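-- pv_equiv track=rewrite | github.com/ricardoy/ucurve_partition | lattice/partition.py | normalize_mask
-- ===== SOURCE A (Python) =====
-- from typing import Tuple
--
-- def normalize_mask(mask:Tuple[int, ...]):
--     c = 0
--     d = dict()
--     v = []
--     for x in mask:
--         if x in d:
--             v.append(d[x])
--         else:
--             d[x] = c
--             v.append(c)
--             c += 1
--     return tuple(v)
-- ===== SOURCE B (Python) =====
-- def normalize_mask(mask):
--     return tuple(len(set(mask[:mask.index(x)])) for x in mask)
-- ===== Notes on version B (the rewrite author's own statement) =====
-- stated objective: simpler
-- what changed: B drops A's counter+dict loop: each element's label is computed independently as the number of distinct values in the prefix before its first occurrence (len(set(mask[:mask.index(x)]))), a stateless one-liner; it trades A's O(n) incremental scan for O(n^2) work.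
import Mathlib
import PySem

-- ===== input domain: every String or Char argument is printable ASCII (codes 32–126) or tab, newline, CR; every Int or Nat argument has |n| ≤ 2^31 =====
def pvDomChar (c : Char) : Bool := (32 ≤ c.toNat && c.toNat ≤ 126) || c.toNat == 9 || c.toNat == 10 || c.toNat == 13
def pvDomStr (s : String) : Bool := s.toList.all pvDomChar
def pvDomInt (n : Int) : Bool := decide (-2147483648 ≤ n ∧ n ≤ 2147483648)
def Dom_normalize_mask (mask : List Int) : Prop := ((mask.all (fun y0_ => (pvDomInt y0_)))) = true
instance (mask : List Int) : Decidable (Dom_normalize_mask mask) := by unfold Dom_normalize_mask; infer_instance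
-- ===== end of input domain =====

-- B replaces A's counter+dict loop by a stateless per-element formula: the label of x is
-- the number of distinct values in the prefix before x's first occurrence (no change in the
-- return value; B is simpler, not faster).

-- ===== PORT A =====
-- state (c, d, v): counter, value→label dict, output list
def normalize_mask (mask : List Int) : List Int :=
  (mask.foldl (fun (st : Int × PySem.Dict Int Int × List Int) x =>
      match st.2.1.get? x with
      | some l => (st.1, st.2.1, st.2.2 ++ [l])
      | none   => (st.1 + 1, st.2.1.insert x st.1, st.2.2 ++ [st.1]))
    (0, PySem.Dict.empty, [])).2.2

-- ===== PORT B =====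
-- tuple(len(set(mask[:mask.index(x)])) for x in mask): each label is computed independently.
-- mask.index(x) never raises here (x is drawn from mask), so the none branch is unreachable.
def normalize_mask_alt (mask : List Int) : List Int :=
  mask.map (fun x =>
    match PySem.List.index? mask x with
    | some i => PySem.Set.len (PySem.Set.ofList (PySem.List.slice mask none (some (i : Int))))
    | none => 0)

-- ===== PRECONDITION & SPEC =====
def Spec_normalize_mask (mask : List Int) (out : List Int) : Prop := out = normalize_mask_alt mask
instance (mask : List Int) (out : List Int) : Decidable (Spec_normalize_mask mask out) := by unfold Spec_normalize_mask; infer_instance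

-- ===== CLAIM (what is proved, stated in full; the proofs are below) =====
def Claim_equal_normalize_mask : Prop := ∀ (mask : List Int), Dom_normalize_mask mask → Spec_normalize_mask mask (normalize_mask mask)

-- ===== LEMMAS AND PROOFS =====

-- Both ports are shown equal to: mask.map (fun y => index of y in PySem.List.dedup mask).

-- ---- A side: the dict A maintains is elem ↦ its first-appearance index ----
def pvEnumDict (seen : List Int) (s : Int) : PySem.Dict Int Int :=
  PySem.Dict.mk ((PySem.List.enumerate seen s).map (fun p => (p.2, p.1)))

lemma pvEnumDict_get? (seen : List Int) (s : Int) (x : Int) :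
    (pvEnumDict seen s).get? x
      = if x ∈ seen then some (s + (seen.idxOf x : Int)) else none := by
  induction seen generalizing s with
  | nil =>
      simp only [pvEnumDict, PySem.List.enumerate_nil, List.map_nil, List.not_mem_nil, if_false]
      exact PySem.Dict.get?_empty x
  | cons y t ih =>
      rw [pvEnumDict, PySem.List.enumerate_cons]
      by_cases hxy : y = x
      · subst hxy
        simp [PySem.Dict.get?_mk_cons, List.idxOf_cons_self]
      · simp only [List.map_cons, PySem.Dict.get?_mk_cons]
        have hb : (y == x) = false := by simp [hxy]
        rw [hb]
        simp only [Bool.false_eq_true, if_false]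
        rw [show PySem.Dict.mk ((PySem.List.enumerate t (s+1)).map (fun p => (p.2, p.1))) = pvEnumDict t (s+1) from rfl, ih]
        by_cases hx : x ∈ t
        · have hmem : x ∈ y :: t := List.mem_cons_of_mem _ hx
          simp [hx, hmem, List.idxOf_cons_ne _ (fun h => hxy h)]
          ring
        · have : x ∉ y :: t := by
            intro h; rcases List.mem_cons.mp h with h | h
            · exact hxy h.symm
            · exact hx h
          simp [hx, this]

lemma pvEnumDict_append (seen : List Int) (x : Int) (hx : x ∉ seen) :
    (pvEnumDict seen 0).insert x (seen.length : Int) = pvEnumDict (seen ++ [x]) 0 := by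
  have hget : (pvEnumDict seen 0).get? x = none := by simp [pvEnumDict_get?, hx]
  have hc : (pvEnumDict seen 0).contains x = false := by
    rw [PySem.Dict.contains_eq_isSome_get?, hget]; rfl
  apply PySem.Dict.ext
  rw [PySem.Dict.items_insert_of_not_contains _ _ hc]
  show (PySem.List.enumerate seen 0).map (fun p => (p.2, p.1)) ++ [(x, (seen.length : Int))]
      = (PySem.List.enumerate (seen ++ [x]) 0).map (fun p => (p.2, p.1))
  rw [PySem.List.enumerate_append]
  simp [PySem.List.enumerate_cons, PySem.List.enumerate_nil]

lemma pvIdxOf_update_of_mem (x : Int) (rest : List Int) :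
    ∀ (s : List Int), x ∈ s → (PySem.Set.update s rest).idxOf x = s.idxOf x := by
  induction rest with
  | nil => intro s _; simp [PySem.Set.update]
  | cons y t ih =>
      intro s hx
      rw [PySem.Set.update_cons]
      rw [PySem.Set.add_eq_ite]
      by_cases hy : y ∈ s
      · simp only [hy, if_true]; exact ih s hx
      · simp only [hy, if_false]
        rw [ih (s ++ [y]) (List.mem_append_left _ hx)]
        exact List.idxOf_append_of_mem hx

-- A's loop, with the invariant state made explicit
lemma pvLoopA (rest : List Int) :
    ∀ (seen v : List Int),
      (rest.foldl (fun (st : Int × PySem.Dict Int Int × List Int) x =>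
          match st.2.1.get? x with
          | some l => (st.1, st.2.1, st.2.2 ++ [l])
          | none   => (st.1 + 1, st.2.1.insert x st.1, st.2.2 ++ [st.1]))
        ((seen.length : Int), pvEnumDict seen 0, v)).2.2
      = v ++ rest.map (fun x => ((PySem.Set.update seen rest).idxOf x : Int)) := by
  induction rest with
  | nil => intro seen v; simp [PySem.Set.update]
  | cons x t ih =>
      intro seen v
      rw [List.foldl_cons]
      by_cases hx : x ∈ seen
      · have hget : (pvEnumDict seen 0).get? x = some ((seen.idxOf x : Int)) := by
          simp [pvEnumDict_get?, hx]
        simp only [hget]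
        rw [ih seen]
        have hupd : PySem.Set.update seen (x :: t) = PySem.Set.update seen t := by
          rw [PySem.Set.update_cons, PySem.Set.add_of_mem hx]
        rw [hupd]
        have hhead : ((PySem.Set.update seen t).idxOf x : Int) = (seen.idxOf x : Int) := by
          rw [pvIdxOf_update_of_mem x t seen hx]
        simp [hhead]
      · have hget : (pvEnumDict seen 0).get? x = none := by simp [pvEnumDict_get?, hx]
        simp only [hget]
        rw [pvEnumDict_append seen x hx]
        have hlen : ((seen.length : Int)) + 1 = (((seen ++ [x]).length : Nat) : Int) := by
          simp
        rw [hlen, ih (seen ++ [x])]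
        have hupd : PySem.Set.update seen (x :: t) = PySem.Set.update (seen ++ [x]) t := by
          rw [PySem.Set.update_cons, PySem.Set.add_of_not_mem hx]
        rw [hupd]
        have hmemx : x ∈ seen ++ [x] := List.mem_append_right _ (List.mem_singleton.mpr rfl)
        have hhead : ((PySem.Set.update (seen ++ [x]) t).idxOf x : Int) = (seen.length : Int) := by
          rw [pvIdxOf_update_of_mem x t (seen ++ [x]) hmemx]
          rw [List.idxOf_append_of_notMem hx]
          simp [List.idxOf_cons_self]
        simp [hhead]

lemma normalize_mask_eq_map (mask : List Int) :
    normalize_mask mask = mask.map (fun y => ((PySem.List.dedup mask).idxOf y : Int)) := by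
  unfold normalize_mask
  have hA := pvLoopA mask [] []
  rw [show ((([] : List Int).length : Int), pvEnumDict [] 0, ([] : List Int))
      = ((0 : Int), PySem.Dict.empty, ([] : List Int)) by rfl] at hA
  rw [hA]
  simp only [List.nil_append]
  rw [show PySem.Set.update ([] : List Int) mask = PySem.List.dedup mask by
    rw [PySem.Set.update_nil_left, PySem.List.dedup_eq_ofList]]

-- ---- B side ----

-- the position of x in set(first occurrences) is the number of distinct values before it
lemma pvIdxOf_ofList_append (pre suf : List Int) (x : Int) (hx : x ∉ pre) :
    (PySem.Set.ofList (pre ++ x :: suf)).idxOf x = (PySem.Set.ofList pre).length := by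
  have hxs : x ∉ PySem.Set.ofList pre := fun h => hx ((PySem.Set.mem_ofList pre x).mp h)
  have h1 : PySem.Set.ofList (pre ++ x :: suf)
      = PySem.Set.update (PySem.Set.ofList pre ++ [x]) suf := by
    rw [PySem.Set.ofList_eq_foldl, List.foldl_append, List.foldl_cons,
      ← PySem.Set.ofList_eq_foldl, PySem.Set.add_of_not_mem hxs]
    rfl
  rw [h1, pvIdxOf_update_of_mem x suf _ (List.mem_append_right _ (by simp)),
    List.idxOf_append_of_notMem hxs]
  simp [List.idxOf_cons_self]

lemma normalize_mask_alt_eq_map (mask : List Int) :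
    normalize_mask_alt mask = mask.map (fun y => ((PySem.List.dedup mask).idxOf y : Int)) := by
  unfold normalize_mask_alt
  apply List.map_congr_left
  intro x hx
  obtain ⟨k, hk⟩ := Option.isSome_iff_exists.mp
    ((PySem.List.index?_isSome_iff mask x).mpr hx)
  obtain ⟨pre, suf, hd, hlen, hnot⟩ := (PySem.List.index?_eq_some_iff mask x k).mp hk
  simp only [hk]
  rw [PySem.List.slice_to mask (Int.natCast_nonneg k), Int.toNat_natCast]
  have htake : mask.take k = pre := by rw [hd, ← hlen, List.take_left]
  rw [htake, PySem.List.dedup_eq_ofList, hd, pvIdxOf_ofList_append pre suf x hnot]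
  rfl

-- ===== VERDICT (by name: the statement is the Claim_ definition above) =====
theorem normalize_mask_spec : Claim_equal_normalize_mask := by
  intro mask _
  unfold Spec_normalize_mask
  rw [normalize_mask_eq_map, normalize_mask_alt_eq_map]
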